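-- pv_equiv track=rewrite | github.com/ivnprad/webaidj | backend/Core/Utilities.py | SubSetFromKey
-- ===== SOURCE A (Python) =====
-- def SubSetFromKey(originalDict, startKey):
--     start = False
--     subsetDict = {}
--
--     for key in originalDict:
--         if key == startKey or start:
--             start = True
--             subsetDict[key] = originalDict[key]
--
--     return subsetDict
-- ===== SOURCE B (Python) =====
-- def SubSetFromKey(originalDict, startKey):
--     keys = list(originalDict)
--     if startKey not in keys:
--         return {}
--     idx = keys.index(startKey)
--     return {k: originalDict[k] for k in keys[idx:]}
-- ===== Notes on version B (the rewrite author's own statement) =====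
-- stated objective: simpler
-- what changed: Replaces the boolean-flag loop with a two-phase find-the-boundary-then-copy-the-suffix approach: locate startKey's index in the key list and build the result dict from the key suffix by comprehension.
import Mathlib
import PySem

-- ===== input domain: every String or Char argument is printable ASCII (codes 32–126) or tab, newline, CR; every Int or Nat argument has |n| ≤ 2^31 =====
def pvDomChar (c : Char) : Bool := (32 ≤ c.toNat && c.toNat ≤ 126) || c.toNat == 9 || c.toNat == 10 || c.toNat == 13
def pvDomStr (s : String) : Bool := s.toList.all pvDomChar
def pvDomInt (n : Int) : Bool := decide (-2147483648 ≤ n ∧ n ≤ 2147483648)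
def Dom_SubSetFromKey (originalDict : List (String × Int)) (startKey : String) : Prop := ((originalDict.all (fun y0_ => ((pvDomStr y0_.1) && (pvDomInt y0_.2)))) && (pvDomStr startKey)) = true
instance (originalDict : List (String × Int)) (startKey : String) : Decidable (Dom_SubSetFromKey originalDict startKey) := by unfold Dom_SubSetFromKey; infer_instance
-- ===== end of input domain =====

-- B re-implements A with a two-phase find-index-then-copy-suffix decomposition instead of A's
-- boolean-flag loop; return value only, same O(n) cost.

-- ===== PORT A =====
-- originalDict[key]: first-match association-list lookup (key always present when used)
def pvLookup (orig : List (String × Int)) (k : String) : Int :=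
  ((orig.find? (fun p => p.1 == k)).map Prod.snd).getD 0

-- the 'for key in originalDict' loop carrying the flag `start` and the dict being built
def pvALoop (orig : List (String × Int)) (startKey : String) :
    List (String × Int) → Bool → PySem.Dict String Int → PySem.Dict String Int
  | [], _, d => d
  | p :: rest, start, d =>
    if p.1 == startKey || start then
      pvALoop orig startKey rest true (d.insert p.1 (pvLookup orig p.1))
    else
      pvALoop orig startKey rest start d

def SubSetFromKey (originalDict : List (String × Int)) (startKey : String) : List (String × Int) :=
  (pvALoop originalDict startKey originalDict false PySem.Dict.empty).items

-- ===== PORT B =====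
def SubSetFromKey_alt (originalDict : List (String × Int)) (startKey : String) : List (String × Int) :=
  let keys := originalDict.map Prod.fst
  if keys.contains startKey then
    match PySem.List.index? keys startKey with
    | some idx =>
      ((PySem.List.slice keys (some (idx : Int)) none).foldl
        (fun d k => d.insert k (pvLookup originalDict k)) PySem.Dict.empty).items
    | none => PySem.Dict.empty.items
  else
    PySem.Dict.empty.items

-- ===== PRECONDITION & SPEC =====
def Spec_SubSetFromKey (originalDict : List (String × Int)) (startKey : String) (out : List (String × Int)) : Prop := out = SubSetFromKey_alt originalDict startKey
instance (originalDict : List (String × Int)) (startKey : String) (out : List (String × Int)) : Decidable (Spec_SubSetFromKey originalDict startKey out) := by unfold Spec_SubSetFromKey; infer_instance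

-- ===== CLAIM (what is proved, stated in full; the proofs are below) =====
def Claim_equal_SubSetFromKey : Prop := ∀ (originalDict : List (String × Int)) (startKey : String), Dom_SubSetFromKey originalDict startKey → Spec_SubSetFromKey originalDict startKey (SubSetFromKey originalDict startKey)

-- ===== LEMMAS AND PROOFS =====

-- once the flag is true, A's loop is a plain foldl of inserts
theorem pvALoop_true (orig : List (String × Int)) (sk : String) :
    ∀ (l : List (String × Int)) (d : PySem.Dict String Int),
      pvALoop orig sk l true d = l.foldl (fun d p => d.insert p.1 (pvLookup orig p.1)) d := by
  intro l
  induction l with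
  | nil => intro d; rfl
  | cons p rest ih =>
    intro d
    simp [pvALoop, ih]

-- with the flag false, A's loop processes exactly the suffix from the first matching key
theorem pvALoop_false (orig : List (String × Int)) (sk : String) :
    ∀ (l : List (String × Int)) (d : PySem.Dict String Int),
      pvALoop orig sk l false d =
        if (l.map Prod.fst).contains sk then
          (l.dropWhile (fun p => !(p.1 == sk))).foldl
            (fun d p => d.insert p.1 (pvLookup orig p.1)) d
        else d := by
  intro l
  induction l with
  | nil => intro d; simp [pvALoop]
  | cons p rest ih =>
    intro d
    by_cases h : p.1 = sk
    · simp [pvALoop, h, pvALoop_true, List.dropWhile]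
    · have hne : (p.1 == sk) = false := by simp [h]
      have hc : (p.1 :: List.map Prod.fst rest).contains sk = (List.map Prod.fst rest).contains sk := by
        simp [Ne.symm h]
      simp only [pvALoop, hne, Bool.false_or]
      rw [ih, List.map_cons, hc, List.dropWhile_cons_of_pos (by simp [hne])]
      simp

-- dropWhile over a prefix free of sk stops exactly at the first sk
theorem pvDropWhile_prefix (sk : String) (suf : List String) :
    ∀ (pre : List String), sk ∉ pre →
      (pre ++ sk :: suf).dropWhile (fun k => !(k == sk)) = sk :: suf := by
  intro pre
  induction pre with
  | nil => intro _; simp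
  | cons a t ih =>
    intro hn
    have ha : (a == sk) = false := by
      simp only [beq_eq_false_iff_ne]
      exact fun he => hn (by simp [he])
    simp only [List.cons_append, List.dropWhile_cons, ha]
    simpa using ih (fun hm => hn (List.mem_cons_of_mem _ hm))

theorem SubSetFromKey_spec : Claim_equal_SubSetFromKey := by
  intro orig sk _
  unfold Spec_SubSetFromKey SubSetFromKey SubSetFromKey_alt
  rw [pvALoop_false]
  by_cases h : (orig.map Prod.fst).contains sk
  · have hmem : sk ∈ orig.map Prod.fst := by simpa using h
    have hsome := (PySem.List.index?_isSome_iff (xs := orig.map Prod.fst) (v := sk)).2 hmem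
    obtain ⟨idx, hidx⟩ := Option.isSome_iff_exists.1 hsome
    obtain ⟨pre, suf, heq, hlen, hnotpre⟩ := (PySem.List.index?_eq_some_iff _ _ _).1 hidx
    simp only [if_pos h, hidx]
    rw [PySem.List.slice_from_natCast]
    have hdrop : (orig.map Prod.fst).drop idx
        = List.map Prod.fst (orig.dropWhile (fun p => !(p.1 == sk))) := by
      have h1 : (orig.map Prod.fst).drop idx = sk :: suf := by
        rw [heq, ← hlen, List.drop_left]
      have h2 : (orig.map Prod.fst).dropWhile (fun k => !(k == sk)) = sk :: suf := by
        rw [heq]; exact pvDropWhile_prefix sk suf pre hnotpre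
      have h3 : (orig.map Prod.fst).dropWhile (fun k => !(k == sk))
          = List.map Prod.fst (orig.dropWhile (fun p => !(p.1 == sk))) := by
        rw [List.dropWhile_map]; rfl
      rw [h1, ← h2, h3]
    rw [hdrop, List.foldl_map]
  · simp only [if_neg h]
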